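-- pv_equiv track=rewrite | github.com/rakshithad1457-collab/fitness | backend/app/services/nutrition_service.py | _passes
-- ===== SOURCE A (Python) =====
-- from typing import List, Dict
--
-- NON_VEGAN    = ["chicken", "beef", "turkey", "pork", "lamb", "egg", "eggs",
--                 "cheese", "yogurt", "milk", "tuna", "salmon", "shrimp",
--                 "fish", "meat", "cream", "butter", "honey", "whey", "cod",
--                 "tilapia", "sardine", "anchovy", "mince", "bacon", "ham",
--                 "prawn", "crab", "lobster", "scallop", "duck", "venison",
--                 "bison", "gelatin", "lard", "suet", "ghee", "paneer",
--                 "ricotta", "curd", "mozzarella", "parmesan", "feta",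
--                 "cottage cheese", "whipping cream", "heavy cream"]
--
-- GLUTEN_ITEMS = ["flour", "wheat", "bread", "pasta", "tortilla", "barley",
--                 "rye", "oat flour", "soy sauce", "couscous", "bulgur",
--                 "seitan", "panko", "breadcrumbs", "noodles", "pita",
--                 "flatbread", "crackers", "malt", "spelt", "farro"]
--
-- DAIRY_ITEMS  = ["milk", "cheese", "yogurt", "cream", "butter", "whey",
--                 "paneer", "ghee", "curd", "mozzarella", "parmesan", "feta",
--                 "ricotta", "cottage cheese", "kefir", "lactose",
--                 "whipping cream", "heavy cream", "sour cream", "brie",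
--                 "cheddar", "gouda", "halloumi"]
--
-- KETO_EXCLUDE = ["rice", "potato", "bread", "pasta", "quinoa", "oats",
--                 "beans", "tortilla", "banana", "mango", "grape", "corn",
--                 "lentil", "chickpea", "couscous", "sweet potato", "carrot",
--                 "peas", "apple", "orange", "sugar", "maple syrup",
--                 "honey", "dates", "raisin", "barley", "bulgur"]
--
-- def _passes(ingredients_text: str, tags: List[str], restrictions: List[str]) -> bool:
--     tags_lower = [t.lower() for t in tags]
--     ing = ingredients_text.lower()
--     for r in [r.lower().strip() for r in restrictions]:
--         if r == "vegan":
--             if any(item in ing for item in NON_VEGAN):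
--                 return False
--             # also ensure vegan tag present
--             if "vegan" not in tags_lower:
--                 return False
--         elif r in ("gluten-free", "gluten_free"):
--             if any(item in ing for item in GLUTEN_ITEMS):
--                 return False
--         elif r in ("dairy-free", "dairy_free"):
--             if any(item in ing for item in DAIRY_ITEMS):
--                 return False
--         elif r in ("high-protein", "high_protein"):
--             if not any("high-protein" in t or "high_protein" in t for t in tags_lower):
--                 return False
--         elif r in ("low-carb", "low_carb"):
--             if not any("low-carb" in t or "low_carb" in t for t in tags_lower):
--                 return False
--         elif r == "keto":
--             if any(item in ing for item in KETO_EXCLUDE):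
--                 return False
--     return True
-- ===== SOURCE B (Python) =====
-- from typing import List, Dict
--
-- NON_VEGAN    = ["chicken", "beef", "turkey", "pork", "lamb", "egg", "eggs",
--                 "cheese", "yogurt", "milk", "tuna", "salmon", "shrimp",
--                 "fish", "meat", "cream", "butter", "honey", "whey", "cod",
--                 "tilapia", "sardine", "anchovy", "mince", "bacon", "ham",
--                 "prawn", "crab", "lobster", "scallop", "duck", "venison",
--                 "bison", "gelatin", "lard", "suet", "ghee", "paneer",
--                 "ricotta", "curd", "mozzarella", "parmesan", "feta",
--                 "cottage cheese", "whipping cream", "heavy cream"]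
--
-- GLUTEN_ITEMS = ["flour", "wheat", "bread", "pasta", "tortilla", "barley",
--                 "rye", "oat flour", "soy sauce", "couscous", "bulgur",
--                 "seitan", "panko", "breadcrumbs", "noodles", "pita",
--                 "flatbread", "crackers", "malt", "spelt", "farro"]
--
-- DAIRY_ITEMS  = ["milk", "cheese", "yogurt", "cream", "butter", "whey",
--                 "paneer", "ghee", "curd", "mozzarella", "parmesan", "feta",
--                 "ricotta", "cottage cheese", "kefir", "lactose",
--                 "whipping cream", "heavy cream", "sour cream", "brie",
--                 "cheddar", "gouda", "halloumi"]
--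
-- KETO_EXCLUDE = ["rice", "potato", "bread", "pasta", "quinoa", "oats",
--                 "beans", "tortilla", "banana", "mango", "grape", "corn",
--                 "lentil", "chickpea", "couscous", "sweet potato", "carrot",
--                 "peas", "apple", "orange", "sugar", "maple syrup",
--                 "honey", "dates", "raisin", "barley", "bulgur"]
--
-- def _passes(ingredients_text: str, tags: List[str], restrictions: List[str]) -> bool:
--     # Normalize once into a set; then a flat sequence of independent guards,
--     # one per dietary category, instead of a per-restriction dispatch loop.
--     rset = {r.lower().strip() for r in restrictions}
--     ing = ingredients_text.lower()
--     tags_lower = [t.lower() for t in tags]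
--     if "vegan" in rset:
--         if any(k in ing for k in NON_VEGAN) or "vegan" not in tags_lower:
--             return False
--     if "gluten-free" in rset or "gluten_free" in rset:
--         if any(k in ing for k in GLUTEN_ITEMS):
--             return False
--     if "dairy-free" in rset or "dairy_free" in rset:
--         if any(k in ing for k in DAIRY_ITEMS):
--             return False
--     if "high-protein" in rset or "high_protein" in rset:
--         if not any("high-protein" in t or "high_protein" in t for t in tags_lower):
--             return False
--     if "low-carb" in rset or "low_carb" in rset:
--         if not any("low-carb" in t or "low_carb" in t for t in tags_lower):
--             return False
--     if "keto" in rset: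
--         if any(k in ing for k in KETO_EXCLUDE):
--             return False
--     return True
-- ===== Notes on version B (the rewrite author's own statement) =====
-- stated objective: simpler
-- what changed: Replaces A's per-restriction dispatch loop (an if/elif chain evaluated once per restriction, rescanning the keyword lists on every duplicate) by normalizing the restrictions into a set once and running one flat independent guard per dietary category.
import Mathlib
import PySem

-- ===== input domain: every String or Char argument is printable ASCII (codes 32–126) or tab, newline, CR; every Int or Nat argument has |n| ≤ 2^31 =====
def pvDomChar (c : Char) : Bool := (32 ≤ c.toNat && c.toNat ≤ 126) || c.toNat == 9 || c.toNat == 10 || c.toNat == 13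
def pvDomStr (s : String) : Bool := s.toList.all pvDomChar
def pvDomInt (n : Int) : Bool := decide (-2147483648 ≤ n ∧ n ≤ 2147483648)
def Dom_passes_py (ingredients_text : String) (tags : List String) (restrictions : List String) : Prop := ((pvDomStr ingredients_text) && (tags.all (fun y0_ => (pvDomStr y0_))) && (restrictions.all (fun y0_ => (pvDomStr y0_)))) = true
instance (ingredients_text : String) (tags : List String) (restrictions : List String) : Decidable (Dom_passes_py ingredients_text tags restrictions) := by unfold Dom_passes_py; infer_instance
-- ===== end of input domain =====

-- B replaces A's per-restriction dispatch loop by normalizing the restrictions into a set once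
-- and running one flat guard per dietary category (objective: simpler).

-- module-level keyword constants shared by both Pythons
def pvNonVegan : List String := ["chicken", "beef", "turkey", "pork", "lamb", "egg", "eggs",
  "cheese", "yogurt", "milk", "tuna", "salmon", "shrimp", "fish", "meat", "cream", "butter",
  "honey", "whey", "cod", "tilapia", "sardine", "anchovy", "mince", "bacon", "ham", "prawn",
  "crab", "lobster", "scallop", "duck", "venison", "bison", "gelatin", "lard", "suet", "ghee",
  "paneer", "ricotta", "curd", "mozzarella", "parmesan", "feta", "cottage cheese",
  "whipping cream", "heavy cream"]

def pvGlutenItems : List String := ["flour", "wheat", "bread", "pasta", "tortilla", "barley",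
  "rye", "oat flour", "soy sauce", "couscous", "bulgur", "seitan", "panko", "breadcrumbs",
  "noodles", "pita", "flatbread", "crackers", "malt", "spelt", "farro"]

def pvDairyItems : List String := ["milk", "cheese", "yogurt", "cream", "butter", "whey",
  "paneer", "ghee", "curd", "mozzarella", "parmesan", "feta", "ricotta", "cottage cheese",
  "kefir", "lactose", "whipping cream", "heavy cream", "sour cream", "brie", "cheddar",
  "gouda", "halloumi"]

def pvKetoExclude : List String := ["rice", "potato", "bread", "pasta", "quinoa", "oats",
  "beans", "tortilla", "banana", "mango", "grape", "corn", "lentil", "chickpea", "couscous",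
  "sweet potato", "carrot", "peas", "apple", "orange", "sugar", "maple syrup", "honey",
  "dates", "raisin", "barley", "bulgur"]

-- ===== PORT A =====
-- A's for-loop over the normalized restrictions, with its early 'return False's
def pvLoopA (ing : String) (tagsLower : List String) : List String → Bool
  | [] => true
  | r :: rs =>
    if r = "vegan" then
      if pvNonVegan.any (fun item => PySem.Str.isIn item ing) then false
      else if !(tagsLower.contains "vegan") then false
      else pvLoopA ing tagsLower rs
    else if r = "gluten-free" ∨ r = "gluten_free" then
      if pvGlutenItems.any (fun item => PySem.Str.isIn item ing) then false
      else pvLoopA ing tagsLower rs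
    else if r = "dairy-free" ∨ r = "dairy_free" then
      if pvDairyItems.any (fun item => PySem.Str.isIn item ing) then false
      else pvLoopA ing tagsLower rs
    else if r = "high-protein" ∨ r = "high_protein" then
      if !(tagsLower.any (fun t => PySem.Str.isIn "high-protein" t || PySem.Str.isIn "high_protein" t)) then false
      else pvLoopA ing tagsLower rs
    else if r = "low-carb" ∨ r = "low_carb" then
      if !(tagsLower.any (fun t => PySem.Str.isIn "low-carb" t || PySem.Str.isIn "low_carb" t)) then false
      else pvLoopA ing tagsLower rs
    else if r = "keto" then
      if pvKetoExclude.any (fun item => PySem.Str.isIn item ing) then false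
      else pvLoopA ing tagsLower rs
    else pvLoopA ing tagsLower rs

def passes_py (ingredients_text : String) (tags : List String) (restrictions : List String) : Bool :=
  let tagsLower := tags.map PySem.Str.lower
  let ing := PySem.Str.lower ingredients_text
  pvLoopA ing tagsLower (restrictions.map (fun r => PySem.Str.strip (PySem.Str.lower r)))

-- ===== PORT B =====
-- set of normalized restrictions once, then one flat guard per category
def passes_py_alt (ingredients_text : String) (tags : List String) (restrictions : List String) : Bool :=
  let rset : PySem.Set String := PySem.Set.ofList (restrictions.map (fun r => PySem.Str.strip (PySem.Str.lower r)))
  let ing := PySem.Str.lower ingredients_text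
  let tagsLower := tags.map PySem.Str.lower
  if PySem.Set.contains rset "vegan" &&
      (pvNonVegan.any (fun k => PySem.Str.isIn k ing) || !(tagsLower.contains "vegan")) then false
  else if (PySem.Set.contains rset "gluten-free" || PySem.Set.contains rset "gluten_free") &&
      pvGlutenItems.any (fun k => PySem.Str.isIn k ing) then false
  else if (PySem.Set.contains rset "dairy-free" || PySem.Set.contains rset "dairy_free") &&
      pvDairyItems.any (fun k => PySem.Str.isIn k ing) then false
  else if (PySem.Set.contains rset "high-protein" || PySem.Set.contains rset "high_protein") &&
      !(tagsLower.any (fun t => PySem.Str.isIn "high-protein" t || PySem.Str.isIn "high_protein" t)) then false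
  else if (PySem.Set.contains rset "low-carb" || PySem.Set.contains rset "low_carb") &&
      !(tagsLower.any (fun t => PySem.Str.isIn "low-carb" t || PySem.Str.isIn "low_carb" t)) then false
  else if PySem.Set.contains rset "keto" &&
      pvKetoExclude.any (fun k => PySem.Str.isIn k ing) then false
  else true

-- ===== PRECONDITION & SPEC =====
def Spec_passes_py (ingredients_text : String) (tags : List String) (restrictions : List String) (out : Bool) : Prop := out = passes_py_alt ingredients_text tags restrictions
instance (ingredients_text : String) (tags : List String) (restrictions : List String) (out : Bool) : Decidable (Spec_passes_py ingredients_text tags restrictions out) := by unfold Spec_passes_py; infer_instance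

-- ===== CLAIM (what is proved, stated in full; the proofs are below) =====
def Claim_equal_passes_py : Prop := ∀ (ingredients_text : String) (tags : List String) (restrictions : List String), Dom_passes_py ingredients_text tags restrictions → Spec_passes_py ingredients_text tags restrictions (passes_py ingredients_text tags restrictions)

-- ===== LEMMAS AND PROOFS =====

-- proof-side abstraction of A's loop: the six failure checks as opaque booleans
def pvGChain (fV1 fV2 fG fD fH fL fK : Bool) : List String → Bool
  | [] => true
  | r :: rs =>
    if r = "vegan" then
      if fV1 then false
      else if fV2 then false
      else pvGChain fV1 fV2 fG fD fH fL fK rs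
    else if r = "gluten-free" ∨ r = "gluten_free" then
      if fG then false else pvGChain fV1 fV2 fG fD fH fL fK rs
    else if r = "dairy-free" ∨ r = "dairy_free" then
      if fD then false else pvGChain fV1 fV2 fG fD fH fL fK rs
    else if r = "high-protein" ∨ r = "high_protein" then
      if fH then false else pvGChain fV1 fV2 fG fD fH fL fK rs
    else if r = "low-carb" ∨ r = "low_carb" then
      if fL then false else pvGChain fV1 fV2 fG fD fH fL fK rs
    else if r = "keto" then
      if fK then false else pvGChain fV1 fV2 fG fD fH fL fK rs
    else pvGChain fV1 fV2 fG fD fH fL fK rs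

-- B's flat guard chain over any restriction list L, failure checks abstract
def pvGuards (fV1 fV2 fG fD fH fL fK : Bool) (L : List String) : Bool :=
  if L.contains "vegan" && (fV1 || fV2) then false
  else if (L.contains "gluten-free" || L.contains "gluten_free") && fG then false
  else if (L.contains "dairy-free" || L.contains "dairy_free") && fD then false
  else if (L.contains "high-protein" || L.contains "high_protein") && fH then false
  else if (L.contains "low-carb" || L.contains "low_carb") && fL then false
  else if L.contains "keto" && fK then false
  else true

theorem pvLoopA_eq_gChain (ing : String) (tl : List String) (L : List String) :
    pvLoopA ing tl L =
      pvGChain (pvNonVegan.any (fun k => PySem.Str.isIn k ing)) (!(tl.contains "vegan"))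
        (pvGlutenItems.any (fun k => PySem.Str.isIn k ing))
        (pvDairyItems.any (fun k => PySem.Str.isIn k ing))
        (!(tl.any (fun t => PySem.Str.isIn "high-protein" t || PySem.Str.isIn "high_protein" t)))
        (!(tl.any (fun t => PySem.Str.isIn "low-carb" t || PySem.Str.isIn "low_carb" t)))
        (pvKetoExclude.any (fun k => PySem.Str.isIn k ing)) L := by
  induction L with
  | nil => rfl
  | cons r rs ih => simp only [pvLoopA, pvGChain, ih]

-- the dispatch loop equals the flat guard chain: each element either trips its
-- category's failure flag or contributes nothing, independently of order
theorem pvGChain_eq_guards (fV1 fV2 fG fD fH fL fK : Bool) (L : List String) :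
    pvGChain fV1 fV2 fG fD fH fL fK L = pvGuards fV1 fV2 fG fD fH fL fK L := by
  induction L with
  | nil => simp [pvGChain, pvGuards]
  | cons r rs ih =>
    by_cases h1 : r = "vegan"
    · subst h1
      simp [pvGChain, pvGuards, ih]
      cases fV1 <;> cases fV2 <;> simp
    · by_cases h2 : r = "gluten-free" ∨ r = "gluten_free"
      · rcases h2 with rfl | rfl <;> simp [pvGChain, pvGuards, ih] <;> cases fG <;> simp
      · by_cases h3 : r = "dairy-free" ∨ r = "dairy_free"
        · rcases h3 with rfl | rfl <;> simp [pvGChain, pvGuards, ih] <;> cases fD <;> simp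
        · by_cases h4 : r = "high-protein" ∨ r = "high_protein"
          · rcases h4 with rfl | rfl <;> simp [pvGChain, pvGuards, ih] <;> cases fH <;> simp
          · by_cases h5 : r = "low-carb" ∨ r = "low_carb"
            · rcases h5 with rfl | rfl <;> simp [pvGChain, pvGuards, ih] <;> cases fL <;> simp
            · by_cases h6 : r = "keto"
              · subst h6
                simp [pvGChain, pvGuards, ih]
                cases fK <;> simp
              · have e1 : ¬ (r = "gluten-free") := fun h => h2 (Or.inl h)
                have e2 : ¬ (r = "gluten_free") := fun h => h2 (Or.inr h)
                have e3 : ¬ (r = "dairy-free") := fun h => h3 (Or.inl h)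
                have e4 : ¬ (r = "dairy_free") := fun h => h3 (Or.inr h)
                have e5 : ¬ (r = "high-protein") := fun h => h4 (Or.inl h)
                have e6 : ¬ (r = "high_protein") := fun h => h4 (Or.inr h)
                have e7 : ¬ (r = "low-carb") := fun h => h5 (Or.inl h)
                have e8 : ¬ (r = "low_carb") := fun h => h5 (Or.inr h)
                simp [pvGChain, pvGuards, ih, h1, h6, e1, e2, e3, e4, e5, e6, e7, e8,
                      Ne.symm h1, Ne.symm h6, Ne.symm e1, Ne.symm e2, Ne.symm e3,
                      Ne.symm e4, Ne.symm e5, Ne.symm e6, Ne.symm e7, Ne.symm e8]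

-- membership in set(L) is membership in L
theorem pvSetContains_ofList (M : List String) (x : String) :
    PySem.Set.contains (PySem.Set.ofList M) x = M.contains x := by
  simp [PySem.Set.contains_eq_listContains, PySem.Set.mem_ofList]

-- ===== VERDICT (by name: the statement is the Claim_ definition above) =====
theorem passes_py_spec : Claim_equal_passes_py := by
  intro ing tags restr _
  unfold Spec_passes_py passes_py passes_py_alt
  rw [pvLoopA_eq_gChain, pvGChain_eq_guards]
  simp only [pvSetContains_ofList]
  rfl
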